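-- pv_equiv track=rewrite | github.com/AlvaroMontiel/mortalidad | codigo_main/igualar_tablas.py | iguala_tabla
-- ===== SOURCE A (Python) =====
-- def iguala_tabla(datos):
--     lista_ideal = [1,2,3,4,5,6,7,8,9,10,11,12,13,14,15,16,17]
--     for llave in datos.keys():
--         for elemento in lista_ideal:
--             if llave == elemento:
--                 lista_ideal.remove(llave)
--     nuevos_elementos = list()
--     for elemento in lista_ideal:
--         nuevos_elementos.append(0)
--     nuevo_diccionario = dict(zip(lista_ideal, nuevos_elementos))
--     datos.update(nuevo_diccionario)
--     datos_final = dict(sorted(datos.items()))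
--
--     return datos_final
-- ===== SOURCE B (Python) =====
-- def iguala_tabla(datos):
--     for k in range(1, 18):
--         datos.setdefault(k, 0)
--     return dict(sorted(datos.items()))
-- ===== Notes on version B (the rewrite author's own statement) =====
-- stated objective: simpler
-- what changed: A computes the missing keys by scanning-and-removing from a literal 1..17 list (mutated while iterated), builds a parallel zeros list, zips them into a dict and bulk-updates; B is one conditional pass calling datos.setdefault(k, 0) for k in range(1, 18), then sorts the items.
import Mathlib
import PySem

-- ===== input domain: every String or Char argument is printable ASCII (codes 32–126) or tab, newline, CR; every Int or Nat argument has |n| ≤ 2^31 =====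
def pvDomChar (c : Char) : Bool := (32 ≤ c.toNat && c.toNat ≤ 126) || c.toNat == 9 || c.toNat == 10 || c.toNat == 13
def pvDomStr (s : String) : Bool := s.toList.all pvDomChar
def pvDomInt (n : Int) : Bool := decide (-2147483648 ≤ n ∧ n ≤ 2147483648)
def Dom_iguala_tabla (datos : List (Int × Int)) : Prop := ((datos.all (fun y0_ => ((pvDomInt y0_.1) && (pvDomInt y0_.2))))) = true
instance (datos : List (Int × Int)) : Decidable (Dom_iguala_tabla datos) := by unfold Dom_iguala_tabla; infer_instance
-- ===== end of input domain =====

-- B replaces A's remove-scan / zeros-list / zip / bulk-update pipeline by a single setdefault pass over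
-- range(1, 18) (simpler); both A and B mutate the dict `datos` in place in the same way, and the theorem
-- below is about the RETURN value.

-- ===== PORT A =====
-- Python's `for elemento in lista_ideal: if llave == elemento: lista_ideal.remove(llave)` iterates by
-- internal index over the list being mutated; this helper models that index-based iteration exactly
-- (remove = erase the first occurrence, the next index is i+1 in the shrunk list, as in CPython).
def igualaInnerLoop (llave : Int) (li : List Int) (i : Nat) : List Int :=
  if h : i < li.length then
    if llave == li[i] then igualaInnerLoop llave (li.erase llave) (i + 1)
    else igualaInnerLoop llave li (i + 1)
  else li
termination_by li.length - i
decreasing_by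
  · have : (li.erase llave).length < li.length := by
      have hm : llave ∈ li := by
        have : llave = li[i] := by simpa using ‹(llave == li[i]) = true›
        exact this ▸ li.getElem_mem h
      simpa [List.length_erase_of_mem hm] using Nat.sub_lt (List.length_pos_of_mem hm) Nat.one_pos
    omega
  · omega

def iguala_tabla (datos : List (Int × Int)) : List (Int × Int) :=
  let d := PySem.Dict.ofList datos
  let lista_ideal : List Int := [1,2,3,4,5,6,7,8,9,10,11,12,13,14,15,16,17]
  let lista_ideal := d.keys.foldl (fun li llave => igualaInnerLoop llave li 0) lista_ideal
  let nuevos_elementos := lista_ideal.foldl (fun acc _ => acc ++ [(0 : Int)]) []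
  let nuevo_diccionario := PySem.Dict.ofList (lista_ideal.zip nuevos_elementos)
  let d2 := d.update nuevo_diccionario.items
  PySem.List.sorted2 d2.items (fun p => p.1) (fun p => p.2) false

-- ===== PORT B =====
def iguala_tabla_alt (datos : List (Int × Int)) : List (Int × Int) :=
  let d := (PySem.List.pyRange 1 18 1).foldl (fun d k => d.setdefault k 0) (PySem.Dict.ofList datos)
  PySem.List.sorted2 d.items (fun p => p.1) (fun p => p.2) false

-- ===== PRECONDITION & SPEC =====
def Spec_iguala_tabla (datos : List (Int × Int)) (out : List (Int × Int)) : Prop := out = iguala_tabla_alt datos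
instance (datos : List (Int × Int)) (out : List (Int × Int)) : Decidable (Spec_iguala_tabla datos out) := by unfold Spec_iguala_tabla; infer_instance

-- ===== CLAIM (what is proved, stated in full; the proofs are below) =====
def Claim_equal_iguala_tabla : Prop := ∀ (datos : List (Int × Int)), Dom_iguala_tabla datos → Spec_iguala_tabla datos (iguala_tabla datos)

-- ===== LEMMAS AND PROOFS =====

-- A's mutated-iteration inner loop on a duplicate-free list: past index i it just erases the first occurrence.
theorem igualaInnerLoop_eq (llave : Int) (li : List Int) (i : Nat) (hnd : li.Nodup) :
    igualaInnerLoop llave li i = if llave ∈ li.drop i then li.erase llave else li := by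
  fun_induction igualaInnerLoop llave li i with
  | case1 li i h heq ih =>
    have hv : llave = li[i] := by simpa using heq
    have hm : llave ∈ li := hv ▸ li.getElem_mem h
    have hnd' : (li.erase llave).Nodup := hnd.erase _
    rw [ih hnd']
    have hnotin : llave ∉ li.erase llave := (hnd.mem_erase_iff).not.mpr (by simp)
    have h2 : llave ∉ (li.erase llave).drop (i+1) := fun hc => hnotin (List.mem_of_mem_drop hc)
    have h3 : llave ∈ li.drop i := by
      rw [List.drop_eq_getElem_cons h]; exact hv ▸ List.mem_cons_self
    simp [h2, h3]
  | case2 li i h heq ih =>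
    have hv : llave ≠ li[i] := by simpa using heq
    rw [ih hnd]
    have hmem : llave ∈ List.drop i li ↔ llave ∈ List.drop (i + 1) li := by
      rw [List.drop_eq_getElem_cons h, List.mem_cons]
      exact ⟨fun hc => hc.resolve_left hv, Or.inr⟩
    rw [if_congr hmem.symm rfl rfl]
  | case3 li i h =>
    have : li.drop i = [] := List.drop_eq_nil_of_le (by omega)
    simp [this]

theorem igualaInnerLoop_zero (llave : Int) (li : List Int) (hnd : li.Nodup) :
    igualaInnerLoop llave li 0 = li.erase llave := by
  rw [igualaInnerLoop_eq llave li 0 hnd]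
  by_cases h : llave ∈ li
  · simp [h]
  · simp [h, List.erase_of_not_mem h]

-- A's outer loop over the dict keys erases each key: on a duplicate-free list that is a filter.
theorem foldl_inner_eq_filter (ks : List Int) (li : List Int) (hnd : li.Nodup) :
    ks.foldl (fun li k => igualaInnerLoop k li 0) li = li.filter (fun x => !(ks.contains x)) := by
  induction ks generalizing li with
  | nil => simp
  | cons k ks ih =>
    rw [List.foldl_cons, igualaInnerLoop_zero k li hnd, ih _ (hnd.erase _)]
    rw [hnd.erase_eq_filter]
    rw [List.filter_filter]
    apply List.filter_congr
    intro x _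
    by_cases h1 : k = x <;> by_cases h2 : x ∈ ks <;> simp [h1, h2, bne, beq_eq_decide]

-- B's setdefault pass over distinct keys appends (k, 0) for exactly the keys the dict lacks.
theorem setdefault_fold_items (ks : List Int) (d : PySem.Dict Int Int) (hnd : ks.Nodup) :
    (ks.foldl (fun d k => d.setdefault k 0) d).items
      = d.items ++ (ks.filter (fun k => !(d.contains k))).map (fun k => (k, (0 : Int))) := by
  induction ks generalizing d with
  | nil => simp
  | cons k ks ih =>
    have hk : k ∉ ks := (List.nodup_cons.mp hnd).1
    have hnd' : ks.Nodup := (List.nodup_cons.mp hnd).2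
    rw [List.foldl_cons]
    by_cases hc : d.contains k = true
    · rw [show d.setdefault k 0 = d from PySem.Dict.setdefault_of_contains d 0 hc, ih _ hnd', List.filter_cons]
      simp [hc]
    · have hc' : d.contains k = false := by simpa using hc
      rw [show d.setdefault k 0 = d.insert k 0 from PySem.Dict.setdefault_of_not_contains d 0 hc', ih _ hnd']
      rw [PySem.Dict.items_insert_of_not_contains d 0 hc']
      have hfc : ks.filter (fun j => !((d.insert k 0).contains j)) = ks.filter (fun j => !(d.contains j)) := by
        apply List.filter_congr
        intro j hj
        have hjk : j ≠ k := fun h => hk (h ▸ hj)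
        rw [PySem.Dict.contains_insert]
        simp [hjk]
      rw [hfc, List.filter_cons]
      simp [hc']

theorem zip_const_zero (l : List Int) : l.zip (l.map fun _ => (0 : Int)) = l.map (fun k => (k, (0 : Int))) :=
  Eq.symm List.map_prod_left_eq_zip

-- ===== VERDICT (by name: the statement is the Claim_ definition above) =====
theorem iguala_tabla_spec : Claim_equal_iguala_tabla := by
  intro datos _
  unfold Spec_iguala_tabla iguala_tabla iguala_tabla_alt
  have hrange : PySem.List.pyRange 1 18 1 = [1,2,3,4,5,6,7,8,9,10,11,12,13,14,15,16,17] := by decide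
  simp only [hrange]
  set d := PySem.Dict.ofList datos with hd
  have hcont : ∀ x : Int, d.keys.contains x = d.contains x := by
    intro x
    rw [PySem.Dict.contains_eq_decide_mem_keys]
    simp
  rw [foldl_inner_eq_filter d.keys _ (by decide)]
  set missing := ([1,2,3,4,5,6,7,8,9,10,11,12,13,14,15,16,17] : List Int).filter (fun x => !(d.keys.contains x)) with hmiss
  have hmnd : missing.Nodup := List.Nodup.filter _ (by decide)
  rw [PySem.List.foldl_append_singleton_eq_map]
  rw [List.nil_append, zip_const_zero]
  set pairs := missing.map (fun k => (k, (0 : Int))) with hpairs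
  have hpk : (pairs.map (·.1)).Nodup := by
    rw [hpairs, List.map_map]
    simpa [Function.comp_def] using hmnd
  have hnuevo : (PySem.Dict.ofList pairs).items = pairs := by
    show (pairs.foldl (fun d p => d.insert p.1 p.2) PySem.Dict.empty).items = pairs
    rw [PySem.Dict.items_foldl_insert_fresh pairs (fun p => p.1) (fun p => p.2) PySem.Dict.empty
      (fun _ _ => PySem.Dict.contains_empty _) hpk]
    simp [PySem.Dict.empty]
  rw [hnuevo]
  have hfresh : ∀ p ∈ pairs, d.contains p.1 = false := by
    intro p hp
    rw [hpairs] at hp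
    obtain ⟨x, hx, rfl⟩ := List.mem_map.mp hp
    rw [hmiss] at hx
    have := (List.mem_filter.mp hx).2
    rw [hcont x] at this
    simpa using this
  have hupd : (d.update pairs).items = d.items ++ pairs := by
    show (pairs.foldl (fun d p => d.insert p.1 p.2) d).items = d.items ++ pairs
    rw [PySem.Dict.items_foldl_insert_fresh pairs (fun p => p.1) (fun p => p.2) d hfresh hpk]
    simp
  rw [hupd]
  rw [setdefault_fold_items _ d (by decide)]
  have : ([1,2,3,4,5,6,7,8,9,10,11,12,13,14,15,16,17] : List Int).filter (fun k => !(d.contains k)) = missing := by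
    rw [hmiss]
    apply List.filter_congr
    intro x _
    rw [hcont x]
  rw [this]
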